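-- pv_equiv track=rewrite | github.com/dujodujo/lemur | Programiranje/datotek_stevila/seznam/ena.py | indeksiraj
-- ===== SOURCE A (Python) =====
-- def indeksiraj(niz, n):
--     slovar = {}
--     for i in range(len(niz)-1):
--         znak = niz[i:i+n]
--         if znak in slovar:
--             slovar[znak].append(i)
--         else:
--             slovar[znak] = [i]
--     return slovar
-- ===== SOURCE B (Python) =====
-- def indeksiraj(niz, n):
--     subs = [niz[i:i+n] for i in range(len(niz)-1)]
--     return {s: [i for i, t in enumerate(subs) if t == s] for s in dict.fromkeys(subs)}
-- ===== Notes on version B (the rewrite author's own statement) =====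
-- stated objective: simpler
-- what changed: Replaces the incremental dict-building loop (membership test, append-or-insert branch) with a two-phase construction: precompute the list of substrings, deduplicate it with dict.fromkeys, and build each distinct substring's index list by one enumerate-filter comprehension.
import Mathlib
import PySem

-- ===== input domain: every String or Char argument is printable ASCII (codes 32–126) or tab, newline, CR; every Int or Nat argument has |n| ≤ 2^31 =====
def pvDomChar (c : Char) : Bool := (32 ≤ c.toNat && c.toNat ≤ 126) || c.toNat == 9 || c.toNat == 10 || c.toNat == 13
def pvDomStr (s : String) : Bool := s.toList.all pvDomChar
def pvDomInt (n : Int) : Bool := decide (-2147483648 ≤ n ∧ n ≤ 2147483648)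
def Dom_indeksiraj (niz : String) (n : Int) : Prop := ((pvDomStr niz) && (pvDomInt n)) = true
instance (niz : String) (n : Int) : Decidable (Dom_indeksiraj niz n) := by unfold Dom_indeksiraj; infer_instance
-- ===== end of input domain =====

-- B replaces A's incremental dict-building loop by "list all substrings, dedup, one filter pass per distinct substring"; objective: simpler.

-- ===== PORT A =====
def indeksiraj (niz : String) (n : Int) : List (String × List Int) :=
  let slovar := (PySem.List.pyRange 0 (PySem.Str.len niz - 1) 1).foldl
    (fun slovar i =>
      let znak := PySem.Str.slice niz (some i) (some (i + n))
      if slovar.contains znak then slovar.modify znak [] (fun l => l ++ [i])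
      else slovar.insert znak [i])
    PySem.Dict.empty
  slovar.items

-- ===== PORT B =====
def indeksiraj_alt (niz : String) (n : Int) : List (String × List Int) :=
  let subs := (PySem.List.pyRange 0 (PySem.Str.len niz - 1) 1).map
    (fun i => PySem.Str.slice niz (some i) (some (i + n)))
  (PySem.List.dedup subs).map (fun s =>
    (s, ((PySem.List.enumerate subs).filter (fun p => p.2 == s)).map (fun p => p.1)))

-- ===== PRECONDITION & SPEC =====
def Spec_indeksiraj (niz : String) (n : Int) (out : List (String × List Int)) : Prop := out = indeksiraj_alt niz n
instance (niz : String) (n : Int) (out : List (String × List Int)) : Decidable (Spec_indeksiraj niz n out) := by unfold Spec_indeksiraj; infer_instance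

-- ===== CLAIM (what is proved, stated in full; the proofs are below) =====
def Claim_equal_indeksiraj : Prop := ∀ (niz : String) (n : Int), Dom_indeksiraj niz n → Spec_indeksiraj niz n (indeksiraj niz n)

-- ===== LEMMAS AND PROOFS =====

-- A's if-branch (append if present, insert otherwise) is exactly Dict.modify with default []
theorem pvStepEq (d : PySem.Dict String (List Int)) (z : String) (i : Int) :
    (if d.contains z then d.modify z [] (fun l => l ++ [i]) else d.insert z [i])
      = d.modify z [] (fun l => l ++ [i]) := by
  by_cases h : d.contains z
  · simp [h]
  · simp only [h, Bool.false_eq_true, reduceIte, PySem.Dict.modify]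
    rw [PySem.Dict.getD_of_not_contains _ _ (by simpa using h)]
    simp

-- a dict with Nodup keys is its key list paired with lookups
theorem pvItemsEq {κ ν : Type} [BEq κ] [LawfulBEq κ] (d : PySem.Dict κ ν) (d0 : ν) (h : d.keys.Nodup) :
    d.items = d.keys.map (fun k => (k, d.getD k d0)) := by
  have hk : d.keys = d.items.map (·.1) := rfl
  rw [hk, List.map_map]
  conv_lhs => rw [show d.items = d.items.map id from (List.map_id _).symm]
  apply List.map_congr_left
  intro p hp
  have hg := PySem.Dict.getD_of_mem_items (d := d) (k := p.1) (v := p.2) (by simpa using hp) h d0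
  simp [Function.comp, hg]

theorem indeksiraj_main (niz : String) (n : Int) : indeksiraj niz n = indeksiraj_alt niz n := by
  unfold indeksiraj indeksiraj_alt
  set m : Int := PySem.Str.len niz - 1 with hm
  set f : Int → String := fun i => PySem.Str.slice niz (some i) (some (i + n)) with hf
  -- A's loop body is unconditional modify
  have hbody : (fun (slovar : PySem.Dict String (List Int)) (i : Int) =>
      let znak := f i
      if slovar.contains znak then slovar.modify znak [] (fun l => l ++ [i])
      else slovar.insert znak [i])
      = (fun d i => d.modify (f i) [] (fun l => l ++ [i])) := by
    funext d i
    exact pvStepEq d (f i) i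
  rw [hbody]
  set D : PySem.Dict String (List Int) :=
    (PySem.List.pyRange 0 m 1).foldl (fun d i => d.modify (f i) [] (fun l => l ++ [i])) PySem.Dict.empty with hD
  have hnodup : D.keys.Nodup := by
    apply PySem.Dict.nodup_keys_foldl_modify_key
    simp
  have hkeys : D.keys = PySem.Set.ofList ((PySem.List.pyRange 0 m 1).map f) := by
    rw [hD, PySem.Dict.keys_foldl_modify_key]
    simp [PySem.Set.update_nil_left]
  have hval : ∀ s : String, D.getD s [] = (PySem.List.pyRange 0 m 1).filter (fun i => f i == s) := by
    intro s
    have hfold : D = ((PySem.List.pyRange 0 m 1).map (fun i => ((f i, i) : String × Int))).foldl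
        (fun d p => d.modify p.1 [] (fun l => l ++ [p.2])) PySem.Dict.empty := by
      rw [hD, List.foldl_map]
    rw [hfold, PySem.Dict.getD_foldl_modify_append, List.filter_map, List.map_map]
    simp [Function.comp_def]
  rw [pvItemsEq D [] hnodup, hkeys]
  simp only [PySem.List.dedup_eq_ofList]
  apply List.map_congr_left
  intro s _
  refine Prod.ext rfl ?_
  rw [hval s]
  -- B's value list: enumerate as a map over a range
  rw [PySem.List.enumerate_eq_map_pyRange _ ""]
  have hlen : (PySem.List.len ((PySem.List.pyRange 0 m 1).map f)) = (m.toNat : Int) := by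
    simp [PySem.List.length_pyRange_one]
  rw [hlen]
  have hrange : PySem.List.pyRange 0 (m.toNat : Int) 1 = PySem.List.pyRange 0 m 1 := by
    rw [PySem.List.pyRange_one, PySem.List.pyRange_one]
    norm_num
    have h2 : (max m 0).toNat = m.toNat := by omega
    rw [h2]
  rw [hrange]
  rw [List.filter_map, List.map_map]
  simp only [Function.comp_def]
  rw [List.map_id']
  symm
  apply List.filter_congr
  intro j hj
  have hjb := (PySem.List.mem_pyRange_one).1 hj
  rw [PySem.List.pyGetD_map_pyRange_of_nonneg f m j "" hjb.1 hjb.2]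

-- ===== VERDICT (by name: the statement is the Claim_ definition above) =====
theorem indeksiraj_spec : Claim_equal_indeksiraj := by
  intro niz n _
  unfold Spec_indeksiraj
  exact indeksiraj_main niz n
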